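-- pv_equiv track=rewrite | github.com/DawnTate/drpg-battle-system | final project/world.py | _farthest_from
-- ===== SOURCE A (Python) =====
-- from typing import List, Tuple
--
-- def _in_bounds(g: List[List[str]], r: int, c: int) -> bool:
--     """Check if (r,c) is inside the grid."""
--     return 0 <= r < len(g) and 0 <= c < len(g[0])
--
-- def _farthest_from(g: List[List[str]], start: Tuple[int,int]) -> Tuple[int,int]:
--     """Find the farthest reachable cell from start using BFS."""
--     from collections import deque
--     h, w = len(g), len(g[0])
--     sr, sc = start
--     dist = [[-1]*w for _ in range(h)]
--     dq = deque([(sr,sc)])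
--     dist[sr][sc] = 0
--     far = (sr, sc)
--     while dq:
--         r,c = dq.popleft()
--         if dist[r][c] > dist[far[0]][far[1]]:
--             far = (r,c)
--         for dr,dc in [(-1,0),(1,0),(0,-1),(0,1)]:
--             nr, nc = r+dr, c+dc
--             if _in_bounds(g,nr,nc) and g[nr][nc] == "." and dist[nr][nc] == -1:
--                 dist[nr][nc] = dist[r][c] + 1
--                 dq.append((nr,nc))
--     return far
-- ===== SOURCE B (Python) =====
-- def _farthest_from(g, start):
--     """Find the farthest reachable cell from start using BFS."""
--     h, w = len(g), len(g[0])
--     sr, sc = start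
--     seen = [[False] * w for _ in range(h)]
--     seen[sr][sc] = True
--     frontier = [(sr, sc)]
--     while True:
--         nxt = []
--         for r, c in frontier:
--             for nr, nc in ((r - 1, c), (r + 1, c), (r, c - 1), (r, c + 1)):
--                 if 0 <= nr < h and 0 <= nc < w and g[nr][nc] == "." and not seen[nr][nc]:
--                     seen[nr][nc] = True
--                     nxt.append((nr, nc))
--         if not nxt:
--             return frontier[0]
--         frontier = nxt
-- ===== Notes on version B (the rewrite author's own statement) =====
-- stated objective: alternative
-- what changed: Replaced A's single-queue BFS with a distance matrix and an in-loop strict-greater argmax by a level-synchronous BFS: whole frontiers are expanded at once over a boolean seen grid (no distances, no argmax anywhere), and the answer is the head of the last non-empty layer.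
-- outside the precondition, e.g. on _farthest_from([['.', 'x'], ['#']], (0, 0)): A returns (0, 0), B returns (0, 0)
import Mathlib
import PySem

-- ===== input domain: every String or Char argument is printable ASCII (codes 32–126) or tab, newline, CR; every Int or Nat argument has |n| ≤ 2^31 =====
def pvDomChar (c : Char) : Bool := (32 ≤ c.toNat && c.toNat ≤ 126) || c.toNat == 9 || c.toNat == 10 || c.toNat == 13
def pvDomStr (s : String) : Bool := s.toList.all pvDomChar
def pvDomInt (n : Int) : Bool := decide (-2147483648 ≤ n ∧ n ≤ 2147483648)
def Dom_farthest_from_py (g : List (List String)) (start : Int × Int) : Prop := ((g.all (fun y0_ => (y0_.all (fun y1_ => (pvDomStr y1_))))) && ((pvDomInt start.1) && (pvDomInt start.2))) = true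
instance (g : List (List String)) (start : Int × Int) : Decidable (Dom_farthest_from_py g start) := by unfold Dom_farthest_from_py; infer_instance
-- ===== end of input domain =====

-- B replaces A's single-queue BFS with a distance matrix and in-loop argmax by a
-- level-synchronous BFS over a boolean seen grid that returns the head of the last
-- non-empty layer (objective: alternative decomposition, same cost).

-- ===== PORT A =====
-- Python list index: i < 0 reads/writes position i + len (exact for the index ranges
-- admitted by Pre_, where every index that occurs is in Python's legal range)
def pvIdx (n : Nat) (i : Int) : Nat := if i < 0 then (i + n).toNat else i.toNat

-- m[r][c] with Python's negative-index semantics, default d (generic: Int grid for A,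
-- Bool grid for B)
def pvG2 {α : Type} (m : List (List α)) (d : α) (r c : Int) : α :=
  let row := m.getD (pvIdx m.length r) []
  row.getD (pvIdx row.length c) d

-- m[r][c] = v with Python's negative-index semantics
def pvS2 {α : Type} (m : List (List α)) (r c : Int) (v : α) : List (List α) :=
  let row := m.getD (pvIdx m.length r) []
  m.set (pvIdx m.length r) (row.set (pvIdx row.length c) v)

-- dist[r][c]
def pvDget (dist : List (List Int)) (r c : Int) : Int := pvG2 dist (-1) r c

-- _in_bounds; len(g[0]) = (g.headD []).length (g ≠ [] whenever A reaches this, by Pre_)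
def pvInB (g : List (List String)) (r c : Int) : Bool :=
  decide (0 ≤ r) && decide (r < (g.length : Int)) && decide (0 ≤ c) && decide (c < ((g.headD []).length : Int))

def pvDirs : List (Int × Int) := [(-1, 0), (1, 0), (0, -1), (0, 1)]

-- body of A's `for dr,dc in [...]` loop, acting on (dist, dq); the grid read uses `.toNat`
-- since it is guarded by _in_bounds (indices nonnegative and in range there)
def pvStepA (g : List (List String)) (rc : Int × Int)
    (s : List (List Int) × List (Int × Int)) (d : Int × Int) :
    List (List Int) × List (Int × Int) :=
  let nr := rc.1 + d.1
  let nc := rc.2 + d.2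
  if pvInB g nr nc && ((g.getD nr.toNat []).getD nc.toNat "" == ".") && (pvDget s.1 nr nc == -1) then
    (pvS2 s.1 nr nc (pvDget s.1 rc.1 rc.2 + 1), s.2 ++ [(nr, nc)])
  else s

-- A's `while dq:` loop; the fuel h*w+2 is an upper bound on the number of iterations
-- (each dequeued cell was marked exactly once), proved and used in the lemmas below.
def pvLoopA (g : List (List String)) :
    Nat → List (List Int) → List (Int × Int) → Int × Int → Int × Int
  | 0, _, _, far => far
  | _ + 1, _, [], far => far
  | fuel + 1, dist, rc :: rest, far =>
      let far' := if pvDget dist rc.1 rc.2 > pvDget dist far.1 far.2 then rc else far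
      let s := pvDirs.foldl (pvStepA g rc) (dist, rest)
      pvLoopA g fuel s.1 s.2 far'

def farthest_from_py (g : List (List String)) (start : Int × Int) : Int × Int :=
  let h := g.length
  let w := (g.headD []).length
  let dist0 := List.replicate h (List.replicate w (-1 : Int))
  let dist1 := pvS2 dist0 start.1 start.2 0
  pvLoopA g (h * w + 2) dist1 [start] start

-- ===== PORT B =====
-- the four neighbour tuples of Source B's inner `for`
def pvNbrs (rc : Int × Int) : List (Int × Int) :=
  [(rc.1 - 1, rc.2), (rc.1 + 1, rc.2), (rc.1, rc.2 - 1), (rc.1, rc.2 + 1)]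

-- body of Source B's inner loop, acting on (seen, nxt); bounds check inline as in Source B
def pvStepL (g : List (List String))
    (t : List (List Bool) × List (Int × Int)) (n : Int × Int) :
    List (List Bool) × List (Int × Int) :=
  if decide (0 ≤ n.1) && decide (n.1 < (g.length : Int)) && decide (0 ≤ n.2) &&
      decide (n.2 < ((g.headD []).length : Int)) &&
      ((g.getD n.1.toNat []).getD n.2.toNat "" == ".") && !(pvG2 t.1 false n.1 n.2) then
    (pvS2 t.1 n.1 n.2 true, t.2 ++ [n])
  else t

-- one round of Source B's `for r, c in frontier` (nxt starts as the accumulator's 2nd component)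
def pvExpand (g : List (List String)) (seen : List (List Bool))
    (frontier : List (Int × Int)) : List (List Bool) × List (Int × Int) :=
  frontier.foldl (fun t rc => (pvNbrs rc).foldl (pvStepL g) t) (seen, [])

-- Source B's `while True:` loop (fuel h*w+2 bounds the number of layers)
def pvLoopL (g : List (List String)) :
    Nat → List (List Bool) → List (Int × Int) → Int × Int
  | 0, _, frontier => frontier.headD (0, 0)
  | fuel + 1, seen, frontier =>
      let t := pvExpand g seen frontier
      if t.2.isEmpty then frontier.headD (0, 0)
      else pvLoopL g fuel t.1 t.2

def farthest_from_py_alt (g : List (List String)) (start : Int × Int) : Int × Int :=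
  let h := g.length
  let w := (g.headD []).length
  let seen0 := List.replicate h (List.replicate w false)
  let seen1 := pvS2 seen0 start.1 start.2 true
  pvLoopL g (h * w + 2) seen1 [start]

-- ===== PRECONDITION & SPEC =====
-- Pre_ excludes starts outside Python's legal (wraparound included) index range of the dist
-- matrix and grids whose later rows are shorter than the first row: on such inputs A raises
-- IndexError — or, on a ragged grid whose short rows BFS never actually reaches, returns a
-- value that B also returns (see cite in claim.json); everything else, including starts with
-- negative in-range components (Python wraparound), is kept.
def Pre_farthest_from_py (g : List (List String)) (start : Int × Int) : Prop :=
  (-(g.length : Int) ≤ start.1 ∧ start.1 < (g.length : Int) ∧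
    -((g.headD []).length : Int) ≤ start.2 ∧ start.2 < ((g.headD []).length : Int)) ∧
  ∀ row ∈ g, (g.headD []).length ≤ row.length
instance (g : List (List String)) (start : Int × Int) : Decidable (Pre_farthest_from_py g start) := by
  unfold Pre_farthest_from_py; infer_instance

def pvWitness_farthest_from_py : List (List String) × (Int × Int) :=
  ([[".", "."], [".", "#"]], (0, 0))

def Spec_farthest_from_py (g : List (List String)) (start : Int × Int) (out : Int × Int) : Prop := out = farthest_from_py_alt g start
instance (g : List (List String)) (start : Int × Int) (out : Int × Int) : Decidable (Spec_farthest_from_py g start out) := by unfold Spec_farthest_from_py; infer_instance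

-- ===== CLAIM (what is proved, stated in full; the proofs are below) =====
def Claim_equal_farthest_from_py : Prop := ∀ (g : List (List String)) (start : Int × Int), Dom_farthest_from_py g start → Pre_farthest_from_py g start → Spec_farthest_from_py g start (farthest_from_py g start)

-- ===== LEMMAS AND PROOFS =====

-- a cell with legal (nonnegative) coordinates inside the grid
def pvInRange (g : List (List String)) (p : Int × Int) : Prop :=
  0 ≤ p.1 ∧ p.1 < (g.length : Int) ∧ 0 ≤ p.2 ∧ p.2 < ((g.headD []).length : Int)

-- a cell whose coordinates are legal Python indices of an h×w matrix (wraparound allowed)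
def pvValid (g : List (List String)) (p : Int × Int) : Prop :=
  -(g.length : Int) ≤ p.1 ∧ p.1 < (g.length : Int) ∧
    -((g.headD []).length : Int) ≤ p.2 ∧ p.2 < ((g.headD []).length : Int)

-- shape of an h×w matrix
def pvShape {α : Type} (g : List (List String)) (m : List (List α)) : Prop :=
  m.length = g.length ∧ ∀ row ∈ m, row.length = (g.headD []).length

-- a cell that may legitimately sit in A's queue / B's frontier
def pvCellOK (g : List (List String)) (start p : Int × Int) : Prop :=
  p = start ∨ pvInRange g p

-- the dist/seen correspondence: a cell is seen iff its distance has been set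
def pvRel (g : List (List String)) (dist : List (List Int)) (seen : List (List Bool)) : Prop :=
  pvShape g dist ∧ pvShape g seen ∧
  ∀ p : Int × Int, pvValid g p → (pvG2 seen false p.1 p.2 = true ↔ pvDget dist p.1 p.2 ≠ -1)

-- number of still-unset entries of the dist matrix
def pvCnt (dist : List (List Int)) : Nat :=
  (dist.map (fun row => row.countP (fun x => x == -1))).sum

lemma pvValid_of_inRange (g : List (List String)) (p : Int × Int)
    (h : pvInRange g p) : pvValid g p := by
  obtain ⟨h1, h2, h3, h4⟩ := h
  exact ⟨by omega, h2, by omega, h4⟩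

lemma pvValid_of_cellOK (g : List (List String)) (start p : Int × Int)
    (hs : pvValid g start) (h : pvCellOK g start p) : pvValid g p := by
  rcases h with h | h
  · exact h ▸ hs
  · exact pvValid_of_inRange g p h

lemma pvIdx_lt (n : Nat) (i : Int) (h1 : -(n : Int) ≤ i) (h2 : i < (n : Int)) :
    pvIdx n i < n := by
  unfold pvIdx
  split <;> omega

lemma pvG2_norm {α : Type} (g : List (List String)) (m : List (List α)) (d : α)
    (hs : pvShape g m) (r c : Int) (hr : pvValid g (r, c)) :
    pvG2 m d r c =
      (m.getD (pvIdx g.length r) []).getD (pvIdx (g.headD []).length c) d := by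
  obtain ⟨hs1, hs2⟩ := hs
  obtain ⟨hr1, hr2, _, _⟩ := hr
  simp only at hr1 hr2
  have hRlt : pvIdx g.length r < m.length := by
    rw [hs1]; exact pvIdx_lt _ _ (by omega) (by omega)
  have hlen : (m.getD (pvIdx g.length r) []).length = (g.headD []).length := by
    rw [List.getD_eq_getElem m [] hRlt]
    exact hs2 _ (List.getElem_mem hRlt)
  show (m.getD (pvIdx m.length r) []).getD
      (pvIdx (m.getD (pvIdx m.length r) []).length c) d = _
  rw [hs1, hlen]

lemma pvS2_norm {α : Type} (g : List (List String)) (m : List (List α))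
    (hs : pvShape g m) (a b : Int) (v : α) (ha : pvValid g (a, b)) :
    pvS2 m a b v =
      m.set (pvIdx g.length a)
        ((m.getD (pvIdx g.length a) []).set (pvIdx (g.headD []).length b) v) := by
  obtain ⟨hs1, hs2⟩ := hs
  obtain ⟨ha1, ha2, _, _⟩ := ha
  simp only at ha1 ha2
  have hAlt : pvIdx g.length a < m.length := by
    rw [hs1]; exact pvIdx_lt _ _ (by omega) (by omega)
  have hlen : (m.getD (pvIdx g.length a) []).length = (g.headD []).length := by
    rw [List.getD_eq_getElem m [] hAlt]
    exact hs2 _ (List.getElem_mem hAlt)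
  show m.set (pvIdx m.length a)
      ((m.getD (pvIdx m.length a) []).set
        (pvIdx (m.getD (pvIdx m.length a) []).length b) v) = _
  rw [hs1, hlen]

lemma pvG2_pvS2 {α : Type} (g : List (List String)) (m : List (List α)) (d : α)
    (hs : pvShape g m) (a b r c : Int) (v : α)
    (ha : pvValid g (a, b)) (hr : pvValid g (r, c)) :
    pvG2 (pvS2 m a b v) d r c =
      if pvIdx g.length r = pvIdx g.length a ∧
          pvIdx (g.headD []).length c = pvIdx (g.headD []).length b then v
      else pvG2 m d r c := by
  obtain ⟨hs1, hs2⟩ := hs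
  obtain ⟨ha1, ha2, ha3, ha4⟩ := ha
  obtain ⟨hr1, hr2, hr3, hr4⟩ := hr
  simp only at ha1 ha2 ha3 ha4 hr1 hr2 hr3 hr4
  have hAlt : pvIdx g.length a < m.length := by
    rw [hs1]; exact pvIdx_lt _ _ (by omega) (by omega)
  have hRlt : pvIdx g.length r < m.length := by
    rw [hs1]; exact pvIdx_lt _ _ (by omega) (by omega)
  have hrowA : m.getD (pvIdx g.length a) [] = m[pvIdx g.length a] :=
    List.getD_eq_getElem m [] hAlt
  have hrowR : m.getD (pvIdx g.length r) [] = m[pvIdx g.length r] :=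
    List.getD_eq_getElem m [] hRlt
  have hrowAlen : (m.getD (pvIdx g.length a) []).length = (g.headD []).length := by
    rw [hrowA]; exact hs2 _ (List.getElem_mem hAlt)
  have hrowRlen : (m.getD (pvIdx g.length r) []).length = (g.headD []).length := by
    rw [hrowR]; exact hs2 _ (List.getElem_mem hRlt)
  have hBlt : pvIdx (g.headD []).length b < (g.headD []).length :=
    pvIdx_lt _ _ (by omega) (by omega)
  have hClt : pvIdx (g.headD []).length c < (g.headD []).length :=
    pvIdx_lt _ _ (by omega) (by omega)
  rw [pvS2_norm g m ⟨hs1, hs2⟩ a b v ⟨ha1, ha2, ha3, ha4⟩,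
    pvG2_norm g _ d ?hshape r c ⟨hr1, hr2, hr3, hr4⟩,
    pvG2_norm g m d ⟨hs1, hs2⟩ r c ⟨hr1, hr2, hr3, hr4⟩]
  case hshape =>
    constructor
    · rw [List.length_set]; exact hs1
    · intro row hrow
      rcases List.mem_or_eq_of_mem_set hrow with hrow | hrow
      · exact hs2 row hrow
      · subst hrow; rw [List.length_set]; exact hrowAlen
  have hRlt' : pvIdx g.length r <
      (m.set (pvIdx g.length a)
        ((m.getD (pvIdx g.length a) []).set (pvIdx (g.headD []).length b) v)).length := by
    rw [List.length_set, ← hs1]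
    rw [hs1]; exact pvIdx_lt _ _ (by omega) (by omega)
  rw [List.getD_eq_getElem _ [] hRlt', List.getElem_set]
  by_cases hra : pvIdx g.length a = pvIdx g.length r
  · simp only [if_pos hra]
    have hlen : ((m.getD (pvIdx g.length a) []).set
        (pvIdx (g.headD []).length b) v).length = (g.headD []).length := by
      rw [List.length_set, hrowAlen]
    rw [List.getD_eq_getElem _ d (by rw [hlen]; exact hClt), List.getElem_set]
    by_cases hcb : pvIdx (g.headD []).length b = pvIdx (g.headD []).length c
    · rw [if_pos hcb, if_pos ⟨hra.symm, hcb.symm⟩]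
    · rw [if_neg hcb, if_neg (by tauto)]
      have : m.getD (pvIdx g.length r) [] = m.getD (pvIdx g.length a) [] := by
        rw [hra]
      rw [this,
        List.getD_eq_getElem _ d (by rw [hrowAlen]; exact hClt)]
  · simp only [if_neg hra]
    rw [← hrowR, if_neg (fun hc => hra hc.1.symm)]

-- pvG2 reads only through the wrapped indices
lemma pvG2_alias {α : Type} (g : List (List String)) (m : List (List α)) (d : α)
    (hs : pvShape g m) (r c r' c' : Int)
    (hr : pvValid g (r, c)) (hr' : pvValid g (r', c'))
    (h1 : pvIdx g.length r = pvIdx g.length r')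
    (h2 : pvIdx (g.headD []).length c = pvIdx (g.headD []).length c') :
    pvG2 m d r c = pvG2 m d r' c' := by
  rw [pvG2_norm g m d hs r c hr, pvG2_norm g m d hs r' c' hr', h1, h2]

lemma pvShape_pvS2 {α : Type} (g : List (List String)) (m : List (List α))
    (hs : pvShape g m) (a b : Int) (v : α) (ha : pvValid g (a, b)) :
    pvShape g (pvS2 m a b v) := by
  constructor
  · simp only [pvS2, List.length_set]; exact hs.1
  · intro row hrow
    simp only [pvS2] at hrow
    rcases List.mem_or_eq_of_mem_set hrow with hrow | hrow
    · exact hs.2 row hrow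
    · subst hrow
      rw [List.length_set]
      obtain ⟨ha1, ha2, _, _⟩ := ha
      simp only at ha1 ha2
      have hlt : pvIdx m.length a < m.length := by
        rw [hs.1]; exact pvIdx_lt _ _ (by omega) (by omega)
      rw [List.getD_eq_getElem _ [] hlt]
      exact hs.2 _ (List.getElem_mem hlt)

lemma pvGetD_replicate {α : Type} (m : Nat) (d : α) (j : Nat) :
    (List.replicate m d).getD j d = d := by
  by_cases h : j < m
  · rw [List.getD_eq_getElem _ _ (by simpa using h)]
    simp
  · rw [List.getD_eq_default _ _ (by simpa using Nat.le_of_not_lt h)]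

lemma pvG2_replicate {α : Type} (n m : Nat) (d : α) (r c : Int) :
    pvG2 (List.replicate n (List.replicate m d)) d r c = d := by
  unfold pvG2
  simp only [List.length_replicate]
  by_cases h : pvIdx n r < n
  · have h1 : (List.replicate n (List.replicate m d)).getD (pvIdx n r) []
        = List.replicate m d := by
      rw [List.getD_eq_getElem _ _ (by simpa using h)]
      simp
    rw [h1]
    exact pvGetD_replicate m d _
  · have h1 : (List.replicate n (List.replicate m d)).getD (pvIdx n r) [] = ([] : List α) :=
      List.getD_eq_default _ _ (by simpa using Nat.le_of_not_lt h)
    rw [h1]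
    simp [List.getD]

lemma pvCountP_set (l : List Int) (j : Nat) (v : Int) (hj : j < l.length)
    (hl : l[j] = -1) (hv : v ≠ -1) :
    (l.set j v).countP (fun x => x == -1) + 1 = l.countP (fun x => x == -1) := by
  induction l generalizing j with
  | nil => simp at hj
  | cons x xs ih =>
      cases j with
      | zero =>
          simp only [List.getElem_cons_zero] at hl
          subst hl
          simp [hv]
      | succ j =>
          simp only [List.getElem_cons_succ] at hl
          simp only [List.length_cons, Nat.add_lt_add_iff_right] at hj
          simp only [List.set_cons_succ, List.countP_cons]
          have := ih j hj hl
          omega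

lemma pvSum_set (xs : List Nat) (i : Nat) (y : Nat) (hi : i < xs.length) :
    (xs.set i y).sum + xs[i] = xs.sum + y := by
  induction xs generalizing i with
  | nil => simp at hi
  | cons x xs ih =>
      cases i with
      | zero => simp [List.sum_cons]; omega
      | succ i =>
          simp only [List.length_cons, Nat.add_lt_add_iff_right] at hi
          simp only [List.set_cons_succ, List.sum_cons, List.getElem_cons_succ]
          have := ih i hi
          omega

lemma pvCnt_set (g : List (List String)) (dist : List (List Int))
    (hs : pvShape g dist) (r c : Int) (hv : pvValid g (r, c)) (v : Int)
    (hvne : v ≠ -1) (hfresh : pvDget dist r c = -1) :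
    pvCnt (pvS2 dist r c v) + 1 = pvCnt dist := by
  obtain ⟨hs1, hs2⟩ := hs
  obtain ⟨h1, h2, h3, h4⟩ := hv
  simp only at h1 h2 h3 h4
  have hI : pvIdx g.length r < dist.length := by
    rw [hs1]; exact pvIdx_lt _ _ (by omega) (by omega)
  have hrow : dist.getD (pvIdx g.length r) [] = dist[pvIdx g.length r] :=
    List.getD_eq_getElem _ _ hI
  have hrlen : (dist.getD (pvIdx g.length r) []).length = (g.headD []).length := by
    rw [hrow]; exact hs2 _ (List.getElem_mem hI)
  have hJ : pvIdx (g.headD []).length c < (dist.getD (pvIdx g.length r) []).length := by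
    rw [hrlen]; exact pvIdx_lt _ _ (by omega) (by omega)
  have hentry : (dist.getD (pvIdx g.length r) [])[pvIdx (g.headD []).length c] = -1 := by
    have hnorm := pvG2_norm g dist (-1) ⟨hs1, hs2⟩ r c ⟨h1, h2, h3, h4⟩
    unfold pvDget at hfresh
    rw [hnorm] at hfresh
    rwa [List.getD_eq_getElem _ _ hJ] at hfresh
  rw [pvS2_norm g dist ⟨hs1, hs2⟩ r c v ⟨h1, h2, h3, h4⟩]
  unfold pvCnt
  rw [List.map_set]
  have hImap : pvIdx g.length r <
      (dist.map (fun row => row.countP (fun x => x == -1))).length := by simpa using hI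
  have hsum := pvSum_set (dist.map (fun row => row.countP (fun x => x == -1)))
    (pvIdx g.length r)
    (((dist.getD (pvIdx g.length r) []).set (pvIdx (g.headD []).length c) v).countP
      (fun x => x == -1)) hImap
  have hget : (dist.map (fun row => row.countP (fun x => x == -1)))[pvIdx g.length r] =
      (dist.getD (pvIdx g.length r) []).countP (fun x => x == -1) := by
    rw [List.getElem_map, hrow]
  rw [hget] at hsum
  have hcp := pvCountP_set (dist.getD (pvIdx g.length r) []) (pvIdx (g.headD []).length c)
    v hJ hentry hvne
  omega

lemma pvCnt_le (g : List (List String)) (dist : List (List Int))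
    (hs : pvShape g dist) : pvCnt dist ≤ g.length * (g.headD []).length := by
  obtain ⟨hs1, hs2⟩ := hs
  unfold pvCnt
  have h := List.sum_le_card_nsmul
    (dist.map (fun row => row.countP (fun x => x == -1))) ((g.headD []).length) ?_
  · simpa [hs1, smul_eq_mul] using h
  · intro x hx
    obtain ⟨row, hrow, rfl⟩ := List.mem_map.mp hx
    calc row.countP (fun x => x == -1) ≤ row.length := List.countP_le_length
      _ = _ := hs2 row hrow

-- one frontier cell's neighbour pass: A's fold (on dist, u ++ n) matches B's fold (on seen, n)
lemma pvCell_corr (g : List (List String)) (D : Int) (hD : 0 ≤ D) (rc : Int × Int)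
    (hrc : pvValid g rc) :
    ∀ (ds : List (Int × Int)) (dist : List (List Int)) (seen : List (List Bool))
      (u n : List (Int × Int)),
      pvRel g dist seen → pvDget dist rc.1 rc.2 = D →
      (∀ p ∈ n, pvInRange g p ∧ pvDget dist p.1 p.2 = D + 1) →
      ∃ dist' seen' n',
        ds.foldl (pvStepA g rc) (dist, u ++ n) = (dist', u ++ n') ∧
        (ds.map (fun d' => (rc.1 + d'.1, rc.2 + d'.2))).foldl (pvStepL g) (seen, n) = (seen', n') ∧
        pvRel g dist' seen' ∧
        (∀ p ∈ n', pvInRange g p ∧ pvDget dist' p.1 p.2 = D + 1) ∧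
        (∀ p : Int × Int, pvValid g p → pvDget dist p.1 p.2 ≠ -1 →
          pvDget dist' p.1 p.2 = pvDget dist p.1 p.2) ∧
        pvCnt dist' + n'.length = pvCnt dist + n.length := by
  intro ds
  induction ds with
  | nil =>
      intro dist seen u n hRel hrcD hn
      exact ⟨dist, seen, n, rfl, rfl, hRel, hn, fun p _ _ => rfl, rfl⟩
  | cons d ds ih =>
      intro dist seen u n hRel hrcD hn
      obtain ⟨hshapeD, hshapeS, hiff⟩ := hRel
      simp only [List.foldl_cons, List.map_cons]
      -- the two guard conditions compute the same Bool
      have hcond : (pvInB g (rc.1 + d.1) (rc.2 + d.2) &&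
            ((g.getD (rc.1 + d.1).toNat []).getD (rc.2 + d.2).toNat "" == ".") &&
            (pvDget dist (rc.1 + d.1) (rc.2 + d.2) == -1))
          = (decide (0 ≤ rc.1 + d.1) && decide (rc.1 + d.1 < (g.length : Int)) &&
            decide (0 ≤ rc.2 + d.2) && decide (rc.2 + d.2 < ((g.headD []).length : Int)) &&
            ((g.getD (rc.1 + d.1).toNat []).getD (rc.2 + d.2).toNat "" == ".") &&
            !(pvG2 seen false (rc.1 + d.1) (rc.2 + d.2))) := by
        by_cases hin : pvInRange g (rc.1 + d.1, rc.2 + d.2)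
        · have hv2 := pvValid_of_inRange g _ hin
          have hbr := hiff (rc.1 + d.1, rc.2 + d.2) hv2
          simp only at hbr
          have hbr' : (pvG2 seen false (rc.1 + d.1) (rc.2 + d.2) = false) ↔
              (pvDget dist (rc.1 + d.1) (rc.2 + d.2) = -1) := by
            rcases Bool.eq_false_or_eq_true (pvG2 seen false (rc.1 + d.1) (rc.2 + d.2))
              with h | h <;> simp [h] at hbr ⊢ <;> tauto
          rw [Bool.eq_iff_iff]
          simp only [pvInB, Bool.and_eq_true, decide_eq_true_eq, beq_iff_eq,
            Bool.not_eq_eq_eq_not, Bool.not_true]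
          tauto
        · rw [Bool.eq_iff_iff]
          simp only [pvInB, Bool.and_eq_true, decide_eq_true_eq, beq_iff_eq,
            Bool.not_eq_eq_eq_not, Bool.not_true]
          unfold pvInRange at hin
          simp only at hin
          tauto
      by_cases hc : (decide (0 ≤ rc.1 + d.1) && decide (rc.1 + d.1 < (g.length : Int)) &&
            decide (0 ≤ rc.2 + d.2) && decide (rc.2 + d.2 < ((g.headD []).length : Int)) &&
            ((g.getD (rc.1 + d.1).toNat []).getD (rc.2 + d.2).toNat "" == ".") &&
            !(pvG2 seen false (rc.1 + d.1) (rc.2 + d.2))) = true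
      · -- guard fires on both sides
        have hin : pvInRange g (rc.1 + d.1, rc.2 + d.2) := by
          simp only [Bool.and_eq_true, decide_eq_true_eq] at hc
          exact ⟨hc.1.1.1.1.1, hc.1.1.1.1.2, hc.1.1.1.2, hc.1.1.2⟩
        have hv2 := pvValid_of_inRange g _ hin
        have hfresh : pvDget dist (rc.1 + d.1) (rc.2 + d.2) = -1 := by
          have hbr := hiff (rc.1 + d.1, rc.2 + d.2) hv2
          simp only at hbr
          simp only [Bool.and_eq_true, Bool.not_eq_eq_eq_not, Bool.not_true] at hc
          by_contra hne
          have := hbr.mpr hne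
          rw [hc.2] at this
          exact Bool.false_ne_true this
        have hA1 : pvStepA g rc (dist, u ++ n) d =
            (pvS2 dist (rc.1 + d.1) (rc.2 + d.2) (D + 1),
              u ++ (n ++ [(rc.1 + d.1, rc.2 + d.2)])) := by
          show (if (pvInB g (rc.1 + d.1) (rc.2 + d.2) &&
                ((g.getD (rc.1 + d.1).toNat []).getD (rc.2 + d.2).toNat "" == ".") &&
                (pvDget dist (rc.1 + d.1) (rc.2 + d.2) == -1)) = true then
              (pvS2 dist (rc.1 + d.1) (rc.2 + d.2) (pvDget dist rc.1 rc.2 + 1),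
                (u ++ n) ++ [(rc.1 + d.1, rc.2 + d.2)])
            else (dist, u ++ n)) = _
          rw [hcond, if_pos hc, hrcD, List.append_assoc]
        have hB1 : pvStepL g (seen, n) (rc.1 + d.1, rc.2 + d.2) =
            (pvS2 seen (rc.1 + d.1) (rc.2 + d.2) true, n ++ [(rc.1 + d.1, rc.2 + d.2)]) := by
          show (if (decide (0 ≤ rc.1 + d.1) && decide (rc.1 + d.1 < (g.length : Int)) &&
            decide (0 ≤ rc.2 + d.2) && decide (rc.2 + d.2 < ((g.headD []).length : Int)) &&
            ((g.getD (rc.1 + d.1).toNat []).getD (rc.2 + d.2).toNat "" == ".") &&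
            !(pvG2 seen false (rc.1 + d.1) (rc.2 + d.2))) = true then
              (pvS2 seen (rc.1 + d.1) (rc.2 + d.2) true, n ++ [(rc.1 + d.1, rc.2 + d.2)])
            else (seen, n)) = _
          rw [if_pos hc]
        set dist1 := pvS2 dist (rc.1 + d.1) (rc.2 + d.2) (D + 1) with hd1
        set seen1 := pvS2 seen (rc.1 + d.1) (rc.2 + d.2) true with hs1
        -- the write leaves every already-set cell unchanged
        have hkeep : ∀ p : Int × Int, pvValid g p → pvDget dist p.1 p.2 ≠ -1 →
            pvDget dist1 p.1 p.2 = pvDget dist p.1 p.2 := by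
          intro p hpv hpne
          unfold pvDget
          rw [hd1, pvG2_pvS2 g dist (-1) hshapeD (rc.1 + d.1) (rc.2 + d.2) p.1 p.2
            (D + 1) hv2 (by exact hpv)]
          split
          · rename_i hm
            have hcontra : pvDget dist p.1 p.2 = -1 := by
              show pvG2 dist (-1) p.1 p.2 = -1
              rw [pvG2_alias g dist (-1) hshapeD p.1 p.2 (rc.1 + d.1) (rc.2 + d.2)
                hpv hv2 hm.1 hm.2]
              exact hfresh
            exact absurd hcontra hpne
          · rfl
        have hRel1 : pvRel g dist1 seen1 := by
          refine ⟨pvShape_pvS2 g dist hshapeD _ _ _ hv2,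
            pvShape_pvS2 g seen hshapeS _ _ _ hv2, ?_⟩
          intro p hpv
          unfold pvDget
          rw [hd1, hs1, pvG2_pvS2 g dist (-1) hshapeD _ _ p.1 p.2 (D + 1) hv2 hpv,
            pvG2_pvS2 g seen false hshapeS _ _ p.1 p.2 true hv2 hpv]
          split
          · constructor
            · intro _; omega
            · intro _; rfl
          · exact hiff p hpv
        have hrcD1 : pvDget dist1 rc.1 rc.2 = D :=
          (hkeep rc hrc (by rw [hrcD]; omega)).trans hrcD
        have hn1 : ∀ p ∈ n ++ [(rc.1 + d.1, rc.2 + d.2)],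
            pvInRange g p ∧ pvDget dist1 p.1 p.2 = D + 1 := by
          intro p hp
          rcases List.mem_append.mp hp with hp | hp
          · obtain ⟨hp1, hp2⟩ := hn p hp
            exact ⟨hp1, (hkeep p (pvValid_of_inRange g p hp1) (by rw [hp2]; omega)).trans hp2⟩
          · rw [List.mem_singleton] at hp
            subst hp
            refine ⟨hin, ?_⟩
            unfold pvDget
            rw [hd1, pvG2_pvS2 g dist (-1) hshapeD _ _ _ _ (D + 1) hv2 hv2,
              if_pos ⟨rfl, rfl⟩]
        have hcnt1 : pvCnt dist1 + 1 = pvCnt dist :=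
          pvCnt_set g dist hshapeD _ _ hv2 (D + 1) (by omega) hfresh
        obtain ⟨dist', seen', n', hA', hB', hRel', hn', hpres', hcnt'⟩ :=
          ih dist1 seen1 u (n ++ [(rc.1 + d.1, rc.2 + d.2)]) hRel1 hrcD1 hn1
        refine ⟨dist', seen', n', ?_, ?_, hRel', hn', ?_, ?_⟩
        · rw [hA1]; exact hA'
        · rw [hB1]; exact hB'
        · intro p hpv hpne
          exact (hpres' p hpv (by rw [hkeep p hpv hpne]; exact hpne)).trans
            (hkeep p hpv hpne)
        · simp only [List.length_append, List.length_cons, List.length_nil] at hcnt' ⊢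
          omega
      · -- guard fails on both sides: both steps are the identity
        have hA1 : pvStepA g rc (dist, u ++ n) d = (dist, u ++ n) := by
          show (if (pvInB g (rc.1 + d.1) (rc.2 + d.2) &&
                ((g.getD (rc.1 + d.1).toNat []).getD (rc.2 + d.2).toNat "" == ".") &&
                (pvDget dist (rc.1 + d.1) (rc.2 + d.2) == -1)) = true then
              (pvS2 dist (rc.1 + d.1) (rc.2 + d.2) (pvDget dist rc.1 rc.2 + 1),
                (u ++ n) ++ [(rc.1 + d.1, rc.2 + d.2)])
            else (dist, u ++ n)) = _
          rw [hcond, if_neg hc]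
        have hB1 : pvStepL g (seen, n) (rc.1 + d.1, rc.2 + d.2) = (seen, n) := by
          show (if (decide (0 ≤ rc.1 + d.1) && decide (rc.1 + d.1 < (g.length : Int)) &&
            decide (0 ≤ rc.2 + d.2) && decide (rc.2 + d.2 < ((g.headD []).length : Int)) &&
            ((g.getD (rc.1 + d.1).toNat []).getD (rc.2 + d.2).toNat "" == ".") &&
            !(pvG2 seen false (rc.1 + d.1) (rc.2 + d.2))) = true then
              (pvS2 seen (rc.1 + d.1) (rc.2 + d.2) true, n ++ [(rc.1 + d.1, rc.2 + d.2)])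
            else (seen, n)) = _
          rw [if_neg hc]
        rw [hA1, hB1]
        exact ih dist seen u n ⟨hshapeD, hshapeS, hiff⟩ hrcD hn

lemma pvLoopA_nil (g : List (List String)) (fuel : Nat) (dist : List (List Int))
    (far : Int × Int) : pvLoopA g fuel dist [] far = far := by
  cases fuel <;> rfl

lemma pvNbrs_eq (rc : Int × Int) :
    pvNbrs rc = pvDirs.map (fun d' => (rc.1 + d'.1, rc.2 + d'.2)) := by
  simp [pvNbrs, pvDirs, sub_eq_add_neg]

-- one whole layer: A dequeues the remaining layer cells L (far already holds the layer head),
-- B folds its frontier loop over L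
lemma pvLayer (g : List (List String)) (start : Int × Int) (hval : pvValid g start)
    (D : Int) (hD : 0 ≤ D) :
    ∀ (L : List (Int × Int)) (fuelA : Nat) (dist : List (List Int))
      (seen : List (List Bool)) (n : List (Int × Int)) (far : Int × Int),
      pvRel g dist seen →
      (∀ p ∈ L, pvCellOK g start p ∧ pvDget dist p.1 p.2 = D) →
      (∀ p ∈ n, pvInRange g p ∧ pvDget dist p.1 p.2 = D + 1) →
      pvValid g far → pvDget dist far.1 far.2 = D →
      L.length ≤ fuelA →
      ∃ dist' seen' n',
        L.foldl (fun t rc => (pvNbrs rc).foldl (pvStepL g) t) (seen, n) = (seen', n') ∧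
        pvLoopA g fuelA dist (L ++ n) far = pvLoopA g (fuelA - L.length) dist' n' far ∧
        pvRel g dist' seen' ∧
        (∀ p ∈ n', pvInRange g p ∧ pvDget dist' p.1 p.2 = D + 1) ∧
        (∀ p : Int × Int, pvValid g p → pvDget dist p.1 p.2 ≠ -1 →
          pvDget dist' p.1 p.2 = pvDget dist p.1 p.2) ∧
        pvCnt dist' + n'.length = pvCnt dist + n.length := by
  intro L
  induction L with
  | nil =>
      intro fuelA dist seen n far hRel hL hn hfarv hfarD hfuel
      exact ⟨dist, seen, n, rfl, by simp, hRel, hn, fun p _ _ => rfl, rfl⟩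
  | cons rc L' ih =>
      intro fuelA dist seen n far hRel hL hn hfarv hfarD hfuel
      have hrcOK := hL rc List.mem_cons_self
      have hrcval : pvValid g rc := pvValid_of_cellOK g start rc hval hrcOK.1
      obtain ⟨fA, rfl⟩ : ∃ fA, fuelA = fA + 1 :=
        ⟨fuelA - 1, by simp only [List.length_cons] at hfuel; omega⟩
      obtain ⟨dist1, seen1, n1, hAfold, hBfold, hRel1, hn1, hpres1, hcnt1⟩ :=
        pvCell_corr g D hD rc hrcval pvDirs dist seen L' n hRel hrcOK.2 hn
      have hDne : ∀ x : Int, x = D → x ≠ -1 := by intro x hx; rw [hx]; omega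
      have hL' : ∀ p ∈ L', pvCellOK g start p ∧ pvDget dist1 p.1 p.2 = D := by
        intro p hp
        have h0 := hL p (List.mem_cons_of_mem _ hp)
        exact ⟨h0.1, (hpres1 p (pvValid_of_cellOK g start p hval h0.1)
          (hDne _ h0.2)).trans h0.2⟩
      have hfarD1 : pvDget dist1 far.1 far.2 = D :=
        (hpres1 far hfarv (hDne _ hfarD)).trans hfarD
      have hfuel' : L'.length ≤ fA := by
        simp only [List.length_cons] at hfuel; omega
      obtain ⟨dist', seen', n', hLfold, hALoop, hRel', hn', hpres', hcnt'⟩ :=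
        ih fA dist1 seen1 n1 far hRel1 hL' hn1 hfarv hfarD1 hfuel'
      refine ⟨dist', seen', n', ?_, ?_, hRel', hn', ?_, ?_⟩
      · rw [List.foldl_cons, pvNbrs_eq rc, hBfold]
        exact hLfold
      · have hfar' : (if pvDget dist rc.1 rc.2 > pvDget dist far.1 far.2
            then rc else far) = far := by
          rw [hrcOK.2, hfarD]
          simp
        have hunf : pvLoopA g (fA + 1) dist ((rc :: L') ++ n) far
            = pvLoopA g fA (pvDirs.foldl (pvStepA g rc) (dist, L' ++ n)).1
                (pvDirs.foldl (pvStepA g rc) (dist, L' ++ n)).2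
                (if pvDget dist rc.1 rc.2 > pvDget dist far.1 far.2 then rc else far) := rfl
        rw [hunf, hfar', hAfold]
        simp only [List.length_cons, Nat.succ_sub_succ]
        exact hALoop
      · intro p hpv hpne
        exact (hpres' p hpv (by rw [hpres1 p hpv hpne]; exact hpne)).trans
          (hpres1 p hpv hpne)
      · omega

-- the two whole loops agree, layer by layer
lemma pvOuter (g : List (List String)) (start : Int × Int) (hval : pvValid g start) :
    ∀ (fuelB : Nat) (D : Int) (fuelA : Nat) (dist : List (List Int))
      (seen : List (List Bool)) (F : List (Int × Int)) (far : Int × Int),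
      0 ≤ D →
      pvRel g dist seen →
      F ≠ [] →
      (∀ p ∈ F, pvCellOK g start p ∧ pvDget dist p.1 p.2 = D) →
      pvValid g far → 0 ≤ pvDget dist far.1 far.2 → pvDget dist far.1 far.2 ≤ D →
      (pvDget dist far.1 far.2 = D → F.headD (0, 0) = far) →
      F.length + pvCnt dist + 1 ≤ fuelA →
      pvCnt dist + 1 ≤ fuelB →
      pvLoopA g fuelA dist F far = pvLoopL g fuelB seen F := by
  intro fuelB
  induction fuelB with
  | zero =>
      intro D fuelA dist seen F far hD hRel hFne hF hfarv hfar0 hfarle hfarhead hfa hfb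
      omega
  | succ fb ih =>
      intro D fuelA dist seen F far hD hRel hFne hF hfarv hfar0 hfarle hfarhead hfa hfb
      obtain ⟨f0, rest, rfl⟩ : ∃ f0 rest, F = f0 :: rest := by
        cases F with
        | nil => exact absurd rfl hFne
        | cons a l => exact ⟨a, l, rfl⟩
      have hf0 := hF f0 List.mem_cons_self
      have hf0val : pvValid g f0 := pvValid_of_cellOK g start f0 hval hf0.1
      obtain ⟨fA, rfl⟩ : ∃ fA, fuelA = fA + 1 :=
        ⟨fuelA - 1, by simp only [List.length_cons] at hfa; omega⟩
      have hfar1 : (if pvDget dist f0.1 f0.2 > pvDget dist far.1 far.2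
          then f0 else far) = f0 := by
        rcases lt_or_eq_of_le hfarle with h | h
        · rw [if_pos (by rw [hf0.2]; exact h)]
        · rw [if_neg (by rw [hf0.2, h]; exact lt_irrefl _)]
          have := hfarhead h
          simp only [List.headD_cons] at this
          exact this.symm
      obtain ⟨dist1, seen1, n1, hAfold, hBfold, hRel1, hn1, hpres1, hcnt1⟩ :=
        pvCell_corr g D hD f0 hf0val pvDirs dist seen rest [] hRel hf0.2 (by simp)
      rw [List.append_nil] at hAfold
      have hDne : ∀ x : Int, x = D → x ≠ -1 := by intro x hx; rw [hx]; omega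
      have hrest1 : ∀ p ∈ rest, pvCellOK g start p ∧ pvDget dist1 p.1 p.2 = D := by
        intro p hp
        have h0 := hF p (List.mem_cons_of_mem _ hp)
        exact ⟨h0.1, (hpres1 p (pvValid_of_cellOK g start p hval h0.1)
          (hDne _ h0.2)).trans h0.2⟩
      have hf0D1 : pvDget dist1 f0.1 f0.2 = D :=
        (hpres1 f0 hf0val (hDne _ hf0.2)).trans hf0.2
      have hfuelL : rest.length ≤ fA := by
        simp only [List.length_cons] at hfa; omega
      obtain ⟨dist2, seen2, n2, hLfold, hALoop, hRel2, hn2, hpres2, hcnt2⟩ :=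
        pvLayer g start hval D hD rest fA dist1 seen1 n1 f0 hRel1 hrest1 hn1 hf0val
          hf0D1 hfuelL
      -- A's loop reaches the end of the layer
      have hA1 : pvLoopA g (fA + 1) dist (f0 :: rest) far
          = pvLoopA g (fA - rest.length) dist2 n2 f0 := by
        have hunf : pvLoopA g (fA + 1) dist (f0 :: rest) far
            = pvLoopA g fA (pvDirs.foldl (pvStepA g f0) (dist, rest)).1
                (pvDirs.foldl (pvStepA g f0) (dist, rest)).2
                (if pvDget dist f0.1 f0.2 > pvDget dist far.1 far.2 then f0 else far) := rfl
        rw [hunf, hfar1, hAfold]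
        exact hALoop
      -- B's round over the frontier is the same expansion
      have hexp : pvExpand g seen (f0 :: rest) = (seen2, n2) := by
        unfold pvExpand
        rw [List.foldl_cons, pvNbrs_eq f0, hBfold]
        exact hLfold
      have hB1 : pvLoopL g (fb + 1) seen (f0 :: rest)
          = if (pvExpand g seen (f0 :: rest)).2.isEmpty then (f0 :: rest).headD (0, 0)
            else pvLoopL g fb (pvExpand g seen (f0 :: rest)).1
              (pvExpand g seen (f0 :: rest)).2 := rfl
      rw [hA1, hB1, hexp]
      by_cases hN2 : n2 = []
      · subst hN2
        simp only [List.isEmpty_nil, if_pos]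
        rw [pvLoopA_nil, List.headD_cons]
      · have hne : ((seen2, n2).2.isEmpty) = false := by
          simp [hN2]
        rw [hne]
        simp only [Bool.false_eq_true, if_false]
        have hlen2 : 1 ≤ n2.length := List.length_pos_of_ne_nil hN2
        have hcntEq : pvCnt dist2 + n2.length = pvCnt dist := by
          simp only [List.length_nil] at hcnt1
          omega
        have hf0D2 : pvDget dist2 f0.1 f0.2 = D :=
          (hpres2 f0 hf0val (hDne _ hf0D1)).trans hf0D1
        apply ih (D + 1) (fA - rest.length) dist2 seen2 n2 f0 (by omega) hRel2 hN2
        · intro p hp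
          exact ⟨Or.inr (hn2 p hp).1, (hn2 p hp).2⟩
        · exact hf0val
        · rw [hf0D2]; omega
        · rw [hf0D2]; omega
        · rw [hf0D2]; intro h; omega
        · simp only [List.length_cons] at hfa
          omega
        · simp only [List.length_cons] at hfa
          omega

-- ===== VERDICT (by name: the statement is the Claim_ definition above) =====
theorem farthest_from_py_spec : Claim_equal_farthest_from_py := by
  intro g start _hDom hPre
  obtain ⟨hw, _hrect⟩ := hPre
  obtain ⟨w1, w2, w3, w4⟩ := hw
  unfold Spec_farthest_from_py
  have hval : pvValid g start := ⟨w1, w2, w3, w4⟩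
  set h := g.length with hh
  set w := (g.headD []).length with hwid
  set dist0 := List.replicate h (List.replicate w (-1 : Int)) with hdist0
  set seen0 := List.replicate h (List.replicate w false) with hseen0
  have hshape0d : pvShape g dist0 := by
    constructor
    · simp [hdist0, hh]
    · intro row hrow
      rw [List.eq_of_mem_replicate hrow, List.length_replicate]
  have hshape0s : pvShape g seen0 := by
    constructor
    · simp [hseen0, hh]
    · intro row hrow
      rw [List.eq_of_mem_replicate hrow, List.length_replicate]
  set dist1 := pvS2 dist0 start.1 start.2 0 with hdist1
  set seen1 := pvS2 seen0 start.1 start.2 true with hseen1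
  have hRel1 : pvRel g dist1 seen1 := by
    refine ⟨pvShape_pvS2 g dist0 hshape0d _ _ _ hval,
      pvShape_pvS2 g seen0 hshape0s _ _ _ hval, ?_⟩
    intro p hp
    unfold pvDget
    rw [hdist1, hseen1,
      pvG2_pvS2 g dist0 (-1) hshape0d start.1 start.2 p.1 p.2 0 hval hp,
      pvG2_pvS2 g seen0 false hshape0s start.1 start.2 p.1 p.2 true hval hp]
    split
    · constructor
      · intro _; omega
      · intro _; rfl
    · rw [hdist0, hseen0, pvG2_replicate, pvG2_replicate]
      simp
  have hstart1 : pvDget dist1 start.1 start.2 = 0 := by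
    unfold pvDget
    rw [hdist1, pvG2_pvS2 g dist0 (-1) hshape0d start.1 start.2 start.1 start.2 0 hval hval,
      if_pos ⟨rfl, rfl⟩]
  have hcnt : pvCnt dist1 ≤ h * w :=
    pvCnt_le g dist1 (pvShape_pvS2 g dist0 hshape0d _ _ _ hval)
  have hmain := pvOuter g start hval (h * w + 2) 0 (h * w + 2) dist1 seen1 [start] start
    le_rfl hRel1 (by simp)
    (by
      intro p hp
      rw [List.mem_singleton] at hp
      subst hp
      exact ⟨Or.inl rfl, hstart1⟩)
    hval (by rw [hstart1]) (by rw [hstart1]) (fun _ => by simp)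
    (by simp only [List.length_cons, List.length_nil]; omega)
    (by omega)
  exact hmain
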